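-- pv_equiv track=rewrite | github.com/AdrishikharChowdhury/Data-Compression-Decompression-Algorithms | huffman/huffmanDecompressor.py | _build_reverse_huffman_tree
-- ===== SOURCE A (Python) =====
-- def _build_reverse_huffman_tree(symbol_lengths):
--     """Build tree with reverse symbol ordering for same lengths"""
--     sorted_symbols = sorted(symbol_lengths.items(), key=lambda x: (x[1], -x[0]))
--
--     current_code = 0
--     prev_length = 0
--     codes = {}
--
--     for symbol, length in sorted_symbols:
--         if length > 0:
--             current_code <<= (length - prev_length)
--             codes[symbol] = format(current_code, f'0{length}b')
--             current_code += 1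
--             prev_length = length
--
--     return codes
-- ===== SOURCE B (Python) =====
-- def _build_reverse_huffman_tree(symbol_lengths):
--     """Canonical codes from per-length counts: base code per length by the
--     RFC1951-style recurrence, then base+index assignment within each length
--     (symbols in descending order)."""
--     counts = {}
--     for length in symbol_lengths.values():
--         if length > 0:
--             counts[length] = counts.get(length, 0) + 1
--
--     base = {}
--     code = 0
--     prev = 0
--     for length in sorted(counts):
--         code = (code + counts.get(prev, 0)) << (length - prev)
--         base[length] = code
--         prev = length
--
--     codes = {}
--     for length in sorted(counts):
--         syms = sorted((s for s, l in symbol_lengths.items() if l == length), reverse=True)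
--         for i, s in enumerate(syms):
--             codes[s] = format(base[length] + i, f'0{length}b')
--     return codes
-- ===== Notes on version B (the rewrite author's own statement) =====
-- stated objective: alternative
-- what changed: Replaces A's single sorted pass with its per-symbol shift-and-increment code counter by three staged passes: count symbols per length, derive each length's base code arithmetically from the counts (RFC1951-style recurrence), then assign base+index within each length over its descending symbols.
import Mathlib
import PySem

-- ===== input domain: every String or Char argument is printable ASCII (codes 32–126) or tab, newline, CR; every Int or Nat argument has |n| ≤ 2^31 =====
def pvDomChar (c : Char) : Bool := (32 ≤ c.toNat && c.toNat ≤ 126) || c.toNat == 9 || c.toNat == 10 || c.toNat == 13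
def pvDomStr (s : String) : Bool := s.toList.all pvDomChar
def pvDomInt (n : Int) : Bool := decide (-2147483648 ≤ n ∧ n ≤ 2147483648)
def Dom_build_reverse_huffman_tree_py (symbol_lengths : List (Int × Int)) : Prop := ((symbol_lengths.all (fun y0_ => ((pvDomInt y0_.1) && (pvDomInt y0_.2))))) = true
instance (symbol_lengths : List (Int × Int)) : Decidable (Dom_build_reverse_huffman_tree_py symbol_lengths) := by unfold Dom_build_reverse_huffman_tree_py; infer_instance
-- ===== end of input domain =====

-- B drops A's single sorted pass with its per-symbol shift-and-increment counter; instead it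
-- counts symbols per length, derives each length's base code arithmetically from the counts
-- (RFC1951-style recurrence), and assigns base+index within each length (alternative decomposition).

-- ===== PORT A =====
-- shared helper: Python's format(c, f'0{l}b') for the nonnegative codes both programs produce
def pvFmtB (c l : Int) : String := PySem.Str.zfill (PySem.Int.toBin c) l

def build_reverse_huffman_tree_py (symbol_lengths : List (Int × Int)) : List (Int × String) :=
  let sorted_symbols := PySem.List.sorted2 (PySem.Dict.ofList symbol_lengths).items (fun x => x.2) (fun x => -x.1)
  let st := sorted_symbols.foldl
    (fun (st : Int × Int × PySem.Dict Int String) x =>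
      if x.2 > 0 then
        -- current_code << (length - prev_length): the shift amount is nonnegative here,
        -- since lengths are processed in ascending order
        let c := st.1 * 2 ^ (x.2 - st.2.1).toNat
        (c + 1, x.2, st.2.2.insert x.1 (pvFmtB c x.2))
      else st)
    (0, 0, PySem.Dict.empty)
  st.2.2.items

-- ===== PORT B =====
def build_reverse_huffman_tree_py_alt (symbol_lengths : List (Int × Int)) : List (Int × String) :=
  -- counts[length] = counts.get(length, 0) + 1 over the dict's values
  let counts := (PySem.Dict.ofList symbol_lengths).values.foldl
    (fun (d : PySem.Dict Int Int) length =>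
      if length > 0 then d.modify length 0 (· + 1) else d)
    PySem.Dict.empty
  -- base codes: code = (code + counts.get(prev, 0)) << (length - prev); shift is nonnegative
  -- since the lengths are iterated in ascending order
  let bst := (PySem.List.sorted counts.keys (fun k => k)).foldl
    (fun (st : Int × Int × PySem.Dict Int Int) length =>
      let code := (st.1 + counts.getD st.2.1 0) * 2 ^ (length - st.2.1).toNat
      (code, length, st.2.2.insert length code))
    (0, 0, PySem.Dict.empty)
  let base := bst.2.2
  -- assignment: codes[s] = format(base[length] + i, f'0{length}b'); base[length] ported as
  -- getD (every iterated length is a key of base, so Python's base[length] never raises)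
  let codes := (PySem.List.sorted counts.keys (fun k => k)).foldl
    (fun (d : PySem.Dict Int String) length =>
      let syms := PySem.List.sorted
        (((PySem.Dict.ofList symbol_lengths).items.filter (fun x => x.2 == length)).map (·.1))
        (fun s => s) true
      (PySem.List.enumerate syms 0).foldl
        (fun (d : PySem.Dict Int String) p => d.insert p.2 (pvFmtB (base.getD length 0 + p.1) length))
        d)
    PySem.Dict.empty
  codes.items

-- ===== PRECONDITION & SPEC =====
def Spec_build_reverse_huffman_tree_py (symbol_lengths : List (Int × Int)) (out : List (Int × String)) : Prop := out = build_reverse_huffman_tree_py_alt symbol_lengths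
instance (symbol_lengths : List (Int × Int)) (out : List (Int × String)) : Decidable (Spec_build_reverse_huffman_tree_py symbol_lengths out) := by unfold Spec_build_reverse_huffman_tree_py; infer_instance

-- ===== CLAIM (what is proved, stated in full; the proofs are below) =====
def Claim_equal_build_reverse_huffman_tree_py : Prop := ∀ (symbol_lengths : List (Int × Int)), Dom_build_reverse_huffman_tree_py symbol_lengths → Spec_build_reverse_huffman_tree_py symbol_lengths (build_reverse_huffman_tree_py symbol_lengths)

-- ===== LEMMAS AND PROOFS =====

-- the lexicographic key A sorts by
def pvKeyL (x : Int × Int) : Lex (Int × Int) := toLex (x.2, -x.1)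

-- the code-assignment sequence A realises, as a function of the emitted (symbol, length) list
def pvAssign : Int → Int → List (Int × Int) → List (Int × String)
  | _, _, [] => []
  | code, prev, x :: t =>
    (x.1, pvFmtB (code * 2 ^ (x.2 - prev).toNat) x.2) :: pvAssign (code * 2 ^ (x.2 - prev).toNat + 1) x.2 t

-- the per-length emission: consecutive codes c, c+1, … at width L
def pvEmit : Int → Int → List Int → List (Int × String)
  | _, _, [] => []
  | c, L, s :: t => (s, pvFmtB c L) :: pvEmit (c + 1) L t

-- the base-code sequence B realises over ascending lengths
def pvBase : Int → Int → (Int → Int) → List Int → List (Int × Int)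
  | _, _, _, [] => []
  | b, prev, cnt, L :: t =>
    (L, (b + cnt prev) * 2 ^ (L - prev).toNat) :: pvBase ((b + cnt prev) * 2 ^ (L - prev).toNat) L cnt t

theorem pvFoldl_skip {α β : Type} (p : α → Prop) [DecidablePred p] (f : β → α → β)
    (l : List α) (init : β) :
    l.foldl (fun acc x => if p x then f acc x else acc) init
      = (l.filter (fun x => decide (p x))).foldl f init := by
  induction l generalizing init with
  | nil => rfl
  | cons x t ih => by_cases h : p x <;> simp [h, ih]

theorem pvSorted2_eq_sorted_lex (xs : List (Int × Int)) :
    PySem.List.sorted2 xs (fun x => x.2) (fun x => -x.1) = PySem.List.sorted xs pvKeyL := by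
  have hb : (fun (a b : Int × Int) => decide (a.2 < b.2) || (!decide (b.2 < a.2) && decide (-a.1 < -b.1)))
      = fun a b => decide (pvKeyL a < pvKeyL b) := by
    funext a b
    rcases lt_trichotomy a.2 b.2 with h | h | h <;>
      simp [pvKeyL, Prod.Lex.lt_iff, h, not_lt_of_gt]
  unfold PySem.List.sorted2 PySem.List.sorted
  simp only [if_neg (by decide : ¬ (false = true))]
  rw [hb]

theorem pvKeyL_inj {a b : Int × Int} (h : pvKeyL a = pvKeyL b) : a = b := by
  have h2 := toLex.injective h
  have h3 : a.2 = b.2 := congrArg Prod.fst h2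
  have h4 : -a.1 = -b.1 := congrArg Prod.snd h2
  exact Prod.ext (by omega) h3

theorem pvFoldA (L : List (Int × Int)) : ∀ (code prev : Int) (d : PySem.Dict Int String),
    (∀ x ∈ L, d.contains x.1 = false) → (L.map (·.1)).Nodup →
    (L.foldl
      (fun (st : Int × Int × PySem.Dict Int String) x =>
        let c := st.1 * 2 ^ (x.2 - st.2.1).toNat
        (c + 1, x.2, st.2.2.insert x.1 (pvFmtB c x.2)))
      (code, prev, d)).2.2.items = d.items ++ pvAssign code prev L := by
  induction L with
  | nil => intro code prev d _ _; simp [pvAssign]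
  | cons x t ih =>
    intro code prev d hf hnd
    simp only [List.map_cons, List.nodup_cons] at hnd
    have hx : d.contains x.1 = false := hf x (by simp)
    simp only [List.foldl_cons]
    rw [ih _ _ _ ?_ hnd.2]
    · rw [PySem.Dict.items_insert_of_not_contains d _ hx]
      simp [pvAssign]
    · intro y hy
      rw [PySem.Dict.contains_insert]
      have hne : y.1 ≠ x.1 := fun e => hnd.1 (e ▸ List.mem_map_of_mem hy)
      simp [hf y (by simp [hy]), hne]

theorem pvFlatMap_congr {κ α : Type} (Ls : List κ) (f g : κ → List α)
    (h : ∀ L ∈ Ls, f L = g L) : Ls.flatMap f = Ls.flatMap g := by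
  induction Ls with
  | nil => rfl
  | cons L t ih =>
    simp only [List.flatMap_cons]
    rw [h L (by simp), ih (fun L hL => h L (by simp [hL]))]

theorem pvGrouping_perm (K : List Int) : ∀ (xs : List (Int × Int)), K.Nodup →
    (∀ x ∈ xs, x.2 ∈ K) →
    (K.flatMap (fun L => xs.filter (fun x => x.2 == L))).Perm xs := by
  induction K with
  | nil =>
    intro xs _ hcov
    cases xs with
    | nil => simp
    | cons x t => exact absurd (hcov x (by simp)) (by simp)
  | cons L K' ih =>
    intro xs hnd hcov
    simp only [List.nodup_cons] at hnd
    simp only [List.flatMap_cons]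
    have hcongr : K'.flatMap (fun L' => xs.filter (fun x => x.2 == L'))
        = K'.flatMap (fun L' => (xs.filter (fun x => !(x.2 == L))).filter (fun x => x.2 == L')) := by
      refine pvFlatMap_congr _ _ _ (fun L' hL' => ?_)
      have hneq : L' ≠ L := fun e => hnd.1 (e ▸ hL')
      rw [List.filter_filter]
      refine (List.filter_congr (fun x _ => ?_)).symm
      by_cases hx : x.2 = L'
      · simp [hx, hneq]
      · simp [hx]
    rw [hcongr]
    have hcov' : ∀ x ∈ xs.filter (fun x => !(x.2 == L)), x.2 ∈ K' := by
      intro x hx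
      have h1 := List.of_mem_filter hx
      have h2 := hcov x (List.mem_of_mem_filter hx)
      simp at h1
      simpa [h1] using h2
    have hperm := ih (xs.filter (fun x => !(x.2 == L))) hnd.2 hcov'
    exact (hperm.append_left _).trans (List.filter_append_perm _ xs)

theorem pvPairwise_flatMap_lex (Ls : List Int) (g : Int → List Int)
    (h1 : Ls.Pairwise (· < ·)) (h2 : ∀ L ∈ Ls, (g L).Pairwise (fun a b => b < a)) :
    (Ls.flatMap (fun L => (g L).map (fun s => (s, L)))).Pairwise
      (fun a b => pvKeyL a < pvKeyL b) := by
  induction Ls with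
  | nil => simp
  | cons L t ih =>
    simp only [List.pairwise_cons] at h1
    simp only [List.flatMap_cons]
    rw [List.pairwise_append]
    refine ⟨?_, ih h1.2 (fun L' hL' => h2 L' (by simp [hL'])), ?_⟩
    · rw [List.pairwise_map]
      refine (h2 L (by simp)).imp ?_
      intro a b hab
      simp [pvKeyL, Prod.Lex.lt_iff]
      omega
    · intro x hx y hy
      obtain ⟨a, _, rfl⟩ := List.mem_map.mp hx
      obtain ⟨L', hL', b, _, rfl⟩ := by simpa using List.mem_flatMap.mp hy
      have : L < L' := h1.1 L' hL'
      simp [pvKeyL, Prod.Lex.lt_iff]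
      omega

theorem pvFlatMap_perm_congr {κ α : Type} (Ls : List κ) (f g : κ → List α)
    (h : ∀ L ∈ Ls, (f L).Perm (g L)) : (Ls.flatMap f).Perm (Ls.flatMap g) := by
  induction Ls with
  | nil => exact List.Perm.refl _
  | cons L t ih =>
    simp only [List.flatMap_cons]
    exact (h L (by simp)).append (ih (fun L hL => h L (by simp [hL])))

-- A's filtered sorted symbol list, regrouped by ascending length with descending symbols
theorem pvCentral (sl : List (Int × Int)) :
    ((PySem.List.sorted (PySem.Dict.ofList sl).items pvKeyL).filter (fun x => decide (x.2 > 0)))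
      = (PySem.List.sorted
            (PySem.Set.ofList ((((PySem.Dict.ofList sl).items.filter (fun x => decide (x.2 > 0))).map (·.2))))
            (fun k => k)).flatMap
          (fun L =>
            ((PySem.List.sorted
                ((((PySem.Dict.ofList sl).items.filter (fun x => decide (x.2 > 0))).filter
                    (fun x => x.2 == L)).map (·.1))
                (fun s => s) true).map (fun s => (s, L)))) := by
  set items := (PySem.Dict.ofList sl).items with hitems
  set pf : Int × Int → Bool := fun x => decide (x.2 > 0) with hpf
  set pos := items.filter pf with hpos
  set Ls := PySem.List.sorted (PySem.Set.ofList (pos.map (·.2))) (fun k => k) with hLs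
  set gsym : Int → List Int :=
    fun L => PySem.List.sorted ((pos.filter (fun x => x.2 == L)).map (·.1)) (fun s => s) true with hgsym
  have hnditems : (items.map (·.1)).Nodup := by
    have := PySem.Dict.nodup_keys_ofList (κ := Int) (ν := Int) sl
    simpa [PySem.Dict.keys, hitems] using this
  have hndpos : (pos.map (·.1)).Nodup := (List.Sublist.map _ List.filter_sublist).nodup hnditems
  have hndg : ∀ L, ((pos.filter (fun x => x.2 == L)).map (·.1)).Nodup := by
    intro L
    exact (List.Sublist.map _ List.filter_sublist).nodup hndpos
  have hLsPair : Ls.Pairwise (· < ·) := PySem.List.sorted_ofList_pairwise_lt (pos.map (·.2))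
  refine List.Perm.eq_of_pairwise (le := fun a b => pvKeyL a ≤ pvKeyL b) ?_ ?_ ?_ ?_
  · intro a b _ _ h1 h2
    exact pvKeyL_inj (le_antisymm h1 h2)
  · exact (PySem.List.sorted_pairwise items pvKeyL).filter _
  · refine (pvPairwise_flatMap_lex Ls gsym hLsPair ?_).imp le_of_lt
    intro L _
    have hle : (gsym L).Pairwise (fun a b => b ≤ a) := by
      simpa using PySem.List.sorted_pairwise_rev ((pos.filter (fun x => x.2 == L)).map (·.1)) (fun s => s)
    have hnd : (gsym L).Nodup := ((PySem.List.sorted_perm _ _ true).symm.nodup (hndg L))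
    exact (hle.and hnd).imp (fun h => lt_of_le_of_ne h.1 (Ne.symm h.2))
  · have hSf : ((PySem.List.sorted items pvKeyL).filter pf).Perm pos :=
      (PySem.List.sorted_perm items pvKeyL false).filter pf
    have hG1 : ∀ L, ((gsym L).map (fun s => (s, L))).Perm (pos.filter (fun x => x.2 == L)) := by
      intro L
      have h1 : (gsym L).Perm ((pos.filter (fun x => x.2 == L)).map (·.1)) :=
        PySem.List.sorted_perm _ _ true
      refine (h1.map (fun s => (s, L))).trans ?_
      rw [List.map_map]
      have hc : ∀ x ∈ pos.filter (fun x => x.2 == L), ((fun s => (s, L)) ∘ (·.1)) x = x := by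
        intro x hx
        have h2 := List.of_mem_filter hx
        simp only [beq_iff_eq] at h2
        simp [Function.comp, ← h2]
      rw [List.map_congr_left hc]
      simp
    have hG2 := pvFlatMap_perm_congr Ls _ _ (fun L _ => hG1 L)
    have hG3 : (Ls.flatMap (fun L => pos.filter (fun x => x.2 == L))).Perm
        ((PySem.Set.ofList (pos.map (·.2))).flatMap (fun L => pos.filter (fun x => x.2 == L))) :=
      List.Perm.flatMap_right _ (PySem.List.sorted_perm _ _ false)
    have hG4 : ((PySem.Set.ofList (pos.map (·.2))).flatMap
        (fun L => pos.filter (fun x => x.2 == L))).Perm pos := by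
      refine pvGrouping_perm _ pos (PySem.Set.nodup_ofList _) ?_
      intro x hx
      rw [PySem.Set.mem_ofList]
      exact List.mem_map_of_mem hx
    exact hSf.trans ((hG2.trans (hG3.trans hG4)).symm)

-- A's assignment over one constant-length group, phrased via pvEmit
theorem pvAssign_group (L : Int) (ss : List Int) : ∀ (code prev : Int) (rest : List (Int × Int)),
    ss ≠ [] →
    pvAssign code prev (ss.map (fun s => (s, L)) ++ rest)
      = pvEmit (code * 2 ^ (L - prev).toNat) L ss
        ++ pvAssign (code * 2 ^ (L - prev).toNat + ss.length) L rest := by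
  induction ss with
  | nil => intro _ _ _ h; exact absurd rfl h
  | cons s t ih =>
    intro code prev rest _
    simp only [List.map_cons, List.cons_append, pvAssign, pvEmit]
    cases t with
    | nil => simp [pvEmit]
    | cons s' t' =>
      rw [ih (code * 2 ^ (L - prev).toNat + 1) L rest (by simp)]
      simp only [List.length_cons]
      have h0 : (L - L).toNat = 0 := by omega
      rw [h0]
      have : code * 2 ^ (L - prev).toNat + (((s' :: t').length : Nat) + 1 : Nat)
          = (code * 2 ^ (L - prev).toNat + 1) * 2 ^ (0 : Nat) + ((s' :: t').length : Nat) := by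
        push_cast; ring
      rw [pow_zero, mul_one]
      congr 1
      push_cast
      ring_nf

-- B's inner enumerate-fold: items grow by pvEmit, freshness is preserved
theorem pvFoldEnum (L : Int) (ss : List Int) : ∀ (j base : Int) (d : PySem.Dict Int String),
    ss.Nodup → (∀ s ∈ ss, d.contains s = false) →
    ((PySem.List.enumerate ss j).foldl
        (fun (d : PySem.Dict Int String) p => d.insert p.2 (pvFmtB (base + p.1) L)) d).items
      = d.items ++ pvEmit (base + j) L ss
    ∧ (∀ s' : Int, d.contains s' = false → s' ∉ ss →
        ((PySem.List.enumerate ss j).foldl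
          (fun (d : PySem.Dict Int String) p => d.insert p.2 (pvFmtB (base + p.1) L)) d).contains s' = false) := by
  induction ss with
  | nil =>
    intro j base d _ _
    refine ⟨by simp [PySem.List.enumerate_nil, pvEmit], fun s' h _ => by
      simpa [PySem.List.enumerate_nil] using h⟩
  | cons s t ih =>
    intro j base d hnd hf
    simp only [List.nodup_cons] at hnd
    have hs : d.contains s = false := hf s (by simp)
    have hfi : ∀ y ∈ t, (d.insert s (pvFmtB (base + j) L)).contains y = false := by
      intro y hy
      rw [PySem.Dict.contains_insert]
      have hne : y ≠ s := fun e => hnd.1 (e ▸ hy)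
      simp [hf y (by simp [hy]), hne]
    obtain ⟨ih1, ih2⟩ := ih (j + 1) base (d.insert s (pvFmtB (base + j) L)) hnd.2 hfi
    simp only [PySem.List.enumerate_cons, List.foldl_cons]
    constructor
    · rw [ih1, PySem.Dict.items_insert_of_not_contains d _ hs, pvEmit]
      have : base + j + 1 = base + (j + 1) := by ring
      rw [this]
      simp
    · intro s' h1 h2
      refine ih2 s' ?_ (fun h => h2 (by simp [h]))
      rw [PySem.Dict.contains_insert]
      have hne : s' ≠ s := fun e => h2 (by simp [e])
      simp [h1, hne]

-- B's base-code fold builds exactly the pvBase association list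
theorem pvFoldBase (cnt : Int → Int) (Ls : List Int) : ∀ (b prev : Int) (d : PySem.Dict Int Int),
    (∀ L ∈ Ls, d.contains L = false) → Ls.Nodup →
    (Ls.foldl
      (fun (st : Int × Int × PySem.Dict Int Int) length =>
        let code := (st.1 + cnt st.2.1) * 2 ^ (length - st.2.1).toNat
        (code, length, st.2.2.insert length code))
      (b, prev, d)).2.2.items = d.items ++ pvBase b prev cnt Ls := by
  induction Ls with
  | nil => intro b prev d _ _; simp [pvBase]
  | cons L t ih =>
    intro b prev d hf hnd
    simp only [List.nodup_cons] at hnd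
    have hL : d.contains L = false := hf L (by simp)
    simp only [List.foldl_cons]
    rw [ih _ _ _ ?_ hnd.2]
    · rw [PySem.Dict.items_insert_of_not_contains d _ hL]
      simp [pvBase]
    · intro y hy
      rw [PySem.Dict.contains_insert]
      have hne : y ≠ L := fun e => hnd.1 (e ▸ hy)
      simp [hf y (by simp [hy]), hne]

theorem pvBase_map_fst (cnt : Int → Int) (Ls : List Int) : ∀ (b prev : Int),
    (pvBase b prev cnt Ls).map (·.1) = Ls := by
  induction Ls with
  | nil => intro _ _; rfl
  | cons L t ih => intro b prev; simp [pvBase, ih]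

-- B's assignment fold equals A's pvAssign over the regrouped list
theorem pvFoldAssignB (g : Int → List Int) (cnt : Int → Int) (D : PySem.Dict Int Int)
    (Ls : List Int) : ∀ (b prev : Int) (d : PySem.Dict Int String),
    (∀ L ∈ Ls, cnt L = ((g L).length : Int)) →
    (∀ L ∈ Ls, g L ≠ []) →
    (Ls.flatMap g).Nodup →
    (∀ s ∈ Ls.flatMap g, d.contains s = false) →
    (∀ p ∈ pvBase b prev cnt Ls, D.getD p.1 0 = p.2) →
    (Ls.foldl
      (fun (d : PySem.Dict Int String) L =>
        (PySem.List.enumerate (g L) 0).foldl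
          (fun (d : PySem.Dict Int String) p => d.insert p.2 (pvFmtB (D.getD L 0 + p.1) L)) d)
      d).items
      = d.items ++ pvAssign (b + cnt prev) prev (Ls.flatMap (fun L => (g L).map (fun s => (s, L)))) := by
  induction Ls with
  | nil => intro b prev d _ _ _ _ _; simp [pvAssign]
  | cons L t ih =>
    intro b prev d hcnt hne hnd hf hbase
    have hc : D.getD L 0 = (b + cnt prev) * 2 ^ (L - prev).toNat :=
      hbase (L, (b + cnt prev) * 2 ^ (L - prev).toNat) (by simp [pvBase])
    set c := (b + cnt prev) * 2 ^ (L - prev).toNat with hcdef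
    simp only [List.flatMap_cons] at hnd hf
    have hndA := List.nodup_append.mp hnd
    have hdisj : ∀ a ∈ g L, ∀ s ∈ t.flatMap g, a ≠ s := fun a ha s hs => hndA.2.2 a ha s hs
    obtain ⟨e1, e2⟩ := pvFoldEnum L (g L) 0 (D.getD L 0) d hndA.1 (fun s hs => hf s (by simp [hs]))
    simp only [List.foldl_cons]
    rw [ih c L _ (fun L' h => hcnt L' (by simp [h])) (fun L' h => hne L' (by simp [h])) hndA.2.1
        (by
          intro s hs
          refine e2 s (hf s (by simp [hs])) (fun hmem => hdisj s hmem s hs rfl))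
        (by
          intro p hp
          exact hbase p (by simp [pvBase, ← hcdef, hp]))]
    rw [e1, List.append_assoc]
    congr 1
    rw [hc, add_zero]
    have hgrp := pvAssign_group L (g L) (b + cnt prev) prev
      (t.flatMap (fun L => (g L).map (fun s => (s, L)))) (hne L (by simp))
    simp only [List.flatMap_cons]
    rw [hgrp, ← hcdef]
    congr 2
    rw [hcnt L (by simp)]

-- ===== VERDICT (by name: the statement is the Claim_ definition above) =====
theorem build_reverse_huffman_tree_py_spec : Claim_equal_build_reverse_huffman_tree_py := by
  intro sl _
  show build_reverse_huffman_tree_py sl = build_reverse_huffman_tree_py_alt sl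
  unfold build_reverse_huffman_tree_py build_reverse_huffman_tree_py_alt
  simp only [pvSorted2_eq_sorted_lex]
  rw [pvFoldl_skip (fun x : Int × Int => x.2 > 0)
      (fun (st : Int × Int × PySem.Dict Int String) x =>
        let c := st.1 * 2 ^ (x.2 - st.2.1).toNat
        (c + 1, x.2, st.2.2.insert x.1 (pvFmtB c x.2)))]
  rw [pvFoldl_skip (fun l : Int => l > 0)
      (fun (d : PySem.Dict Int Int) length => d.modify length 0 (· + 1))]
  -- abbreviations
  set items := (PySem.Dict.ofList sl).items with hitems
  set pos := items.filter (fun x => decide (x.2 > 0)) with hpos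
  set Sf := (PySem.List.sorted items pvKeyL).filter (fun x => decide (x.2 > 0)) with hSf
  -- Nodup facts
  have hnditems : (items.map (·.1)).Nodup := by
    have := PySem.Dict.nodup_keys_ofList (κ := Int) (ν := Int) sl
    simpa [PySem.Dict.keys, hitems] using this
  have hndpos : (pos.map (·.1)).Nodup := (List.Sublist.map _ List.filter_sublist).nodup hnditems
  have hSfperm : Sf.Perm pos := (PySem.List.sorted_perm items pvKeyL false).filter _
  have hSfnd : (Sf.map (·.1)).Nodup := ((hSfperm.map _).nodup_iff).mpr hndpos
  -- the counts dict is the counter of the positive lengths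
  have hvals : (PySem.Dict.ofList sl).values.filter (fun l => decide (l > 0)) = pos.map (·.2) := by
    simp only [PySem.Dict.values, ← hitems, hpos, List.filter_map]
    rfl
  rw [hvals]
  set cntD := (pos.map (·.2)).foldl (fun (d : PySem.Dict Int Int) length => d.modify length 0 (· + 1))
      PySem.Dict.empty with hcntD
  have hcntD' : cntD = PySem.Dict.counter (pos.map (·.2)) := by
    rw [PySem.Dict.counter_eq_foldl]
  have hkeys : cntD.keys = PySem.Set.ofList (pos.map (·.2)) := by
    rw [hcntD', PySem.Dict.keys_counter]
  rw [hkeys]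
  set Ls := PySem.List.sorted (PySem.Set.ofList (pos.map (·.2))) (fun k => k) with hLsdef
  set cnt : Int → Int := fun L => cntD.getD L 0 with hcntdef
  have hcntval : ∀ L, cnt L = ((pos.filter (fun x => x.2 == L)).length : Int) := by
    intro L
    show cntD.getD L 0 = ((pos.filter (fun x => x.2 == L)).length : Int)
    rw [hcntD', PySem.Dict.getD_counter]
    have : (pos.map (·.2)).count L = (pos.filter (fun x => x.2 == L)).length := by
      rw [List.count_eq_countP, List.countP_map, List.countP_eq_length_filter]
      rfl
    rw [this]
  -- the group of symbols per length (descending)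
  set gsym : Int → List Int :=
    fun L => PySem.List.sorted ((pos.filter (fun x => x.2 == L)).map (·.1)) (fun s => s) true with hgsym
  have hglen : ∀ L, ((gsym L).length : Int) = cnt L := by
    intro L
    rw [hcntval, hgsym]
    simp [PySem.List.length_sorted]
  -- Ls facts
  have hLsnd : Ls.Nodup := (PySem.List.sorted_perm _ _ false).nodup_iff.mpr (PySem.Set.nodup_ofList _)
  have hLpos : ∀ L ∈ Ls, L > 0 := by
    intro L hL
    have h1 := (PySem.List.mem_sorted _ _ _ _).mp hL
    rw [PySem.Set.mem_ofList] at h1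
    obtain ⟨x, hx, hx2⟩ := List.mem_map.mp h1
    have := List.of_mem_filter hx
    simp at this
    omega
  have hgne : ∀ L ∈ Ls, gsym L ≠ [] := by
    intro L hL
    rw [hgsym, Ne, PySem.List.sorted_eq_nil_iff, List.map_eq_nil_iff]
    have h1 := (PySem.List.mem_sorted _ _ _ _).mp hL
    rw [PySem.Set.mem_ofList] at h1
    obtain ⟨x, hx, hx2⟩ := List.mem_map.mp h1
    intro hnil
    have hmem : x ∈ pos.filter (fun x => x.2 == L) := List.mem_filter.mpr ⟨hx, by simp [hx2]⟩
    simp [hnil] at hmem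
  -- the central regrouping identity
  have hcentral := pvCentral sl
  rw [← hitems, ← hpos, ← hSf, ← hLsdef] at hcentral
  -- A side becomes pvAssign over Sf
  rw [pvFoldA Sf 0 0 PySem.Dict.empty (fun x _ => by simp [PySem.Dict.contains_empty]) hSfnd]
  -- B: the per-length symbol filter over all items equals the filter over pos
  have hfiltEq : ∀ L ∈ Ls,
      items.filter (fun x => x.2 == L) = pos.filter (fun x => x.2 == L) := by
    intro L hL
    rw [hpos, List.filter_filter]
    refine List.filter_congr (fun x _ => ?_)
    by_cases hx : x.2 = L
    · have := hLpos L hL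
      simp [hx]
      omega
    · simp [hx]
  -- flatMap Nodup / freshness inputs for pvFoldAssignB
  have hmapfst : (Ls.flatMap (fun L => (gsym L).map (fun s => (s, L)))).map (·.1)
      = Ls.flatMap gsym := by
    simp only [List.map_flatMap]
    refine pvFlatMap_congr _ _ _ (fun L _ => ?_)
    simp [Function.comp_def]
  have hfmnd : (Ls.flatMap gsym).Nodup := by
    rw [← hmapfst, ← hcentral]
    exact hSfnd
  -- B's base dict: values along pvBase
  set BD := (Ls.foldl
      (fun (st : Int × Int × PySem.Dict Int Int) length =>
        let code := (st.1 + cntD.getD st.2.1 0) * 2 ^ (length - st.2.1).toNat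
        (code, length, st.2.2.insert length code))
      (0, 0, PySem.Dict.empty)).2.2 with hBD
  have hBDitems : BD.items = pvBase 0 0 cnt Ls := by
    have h := pvFoldBase cnt Ls 0 0 PySem.Dict.empty
      (fun L _ => by simp [PySem.Dict.contains_empty]) hLsnd
    simpa using h
  have hBDkeys : BD.keys = Ls := by
    simp only [PySem.Dict.keys, hBDitems, pvBase_map_fst]
  have hBDget : ∀ p ∈ pvBase 0 0 cnt Ls, BD.getD p.1 0 = p.2 := by
    intro p hp
    have hknd : BD.keys.Nodup := by rw [hBDkeys]; exact hLsnd
    have := PySem.Dict.items_eq_map_keys BD hknd 0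
    rw [hBDitems] at this
    rw [this] at hp
    obtain ⟨k, _, hk⟩ := List.mem_map.mp hp
    rw [← hk]
  -- rewrite B's inner filter and base lookup, then apply the main fold lemma
  have hBfold : (Ls.foldl
      (fun (d : PySem.Dict Int String) length =>
        (PySem.List.enumerate
            (PySem.List.sorted ((items.filter (fun x => x.2 == length)).map (·.1)) (fun s => s) true) 0).foldl
          (fun (d : PySem.Dict Int String) p => d.insert p.2 (pvFmtB (BD.getD length 0 + p.1) length)) d)
      PySem.Dict.empty).items
      = PySem.Dict.empty.items
        ++ pvAssign (0 + cnt 0) 0 (Ls.flatMap (fun L => (gsym L).map (fun s => (s, L)))) := by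
    have hcong := PySem.List.foldl_congr_mem
      (l := Ls) (init := (PySem.Dict.empty : PySem.Dict Int String))
      (f := fun (d : PySem.Dict Int String) length =>
        (PySem.List.enumerate
            (PySem.List.sorted ((items.filter (fun x => x.2 == length)).map (·.1)) (fun s => s) true) 0).foldl
          (fun (d : PySem.Dict Int String) p => d.insert p.2 (pvFmtB (BD.getD length 0 + p.1) length)) d)
      (g := fun (d : PySem.Dict Int String) L =>
        (PySem.List.enumerate (gsym L) 0).foldl
          (fun (d : PySem.Dict Int String) p => d.insert p.2 (pvFmtB (BD.getD L 0 + p.1) L)) d)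
      (fun acc L hL => by dsimp only; rw [hfiltEq L hL])
    rw [hcong]
    exact pvFoldAssignB gsym cnt BD Ls 0 0 PySem.Dict.empty
      (fun L _ => (hglen L).symm) hgne hfmnd
      (fun s _ => by simp [PySem.Dict.contains_empty]) hBDget
  rw [hBfold]
  have hcnt0 : cnt 0 = 0 := by
    rw [hcntval]
    have : pos.filter (fun x => x.2 == (0 : Int)) = [] := by
      rw [List.filter_eq_nil_iff]
      intro x hx
      have := List.of_mem_filter hx
      simp at this ⊢
      omega
    rw [this]
    rfl
  rw [hcnt0, add_zero, hcentral]
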